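-- pv_equiv track=rewrite | github.com/laDok8/aoc | aoc23/main.py | get_min_location_from_ranges
-- ===== SOURCE A (Python) =====
-- def get_min_location_from_ranges(cur_range, all_steps):
--     for f in all_steps:
--         modified_r = []
--         for dest, src, ln in f:
--             src_end, next_r = src + ln, []
--             mapping = lambda x, _dest=dest, _src=src: x + _dest - _src
--             for seed_rng_start, seed_rng_end in cur_range:
--                 before = (seed_rng_start, min(seed_rng_end, src))
--                 inter = (max(seed_rng_start, src), min(seed_rng_end, src_end))
--                 after = (max(seed_rng_start, src_end), seed_rng_end)
--
--                 if before[1] > before[0]: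
--                     next_r.append(before)
--                 if inter[1] > inter[0]:
--                     modified_r.append((mapping(inter[0]), mapping(inter[1])))
--                 if after[1] > after[0]:
--                     next_r.append(after)
--             cur_range = next_r
--         cur_range += modified_r
--     return min(cur_range)[0]
-- ===== SOURCE B (Python) =====
-- def get_min_location_from_ranges(cur_range, all_steps):
--     # Boundary-cut algorithm: per step, sort the distinct mapping boundaries once,
--     # cut each range into atomic pieces at those boundaries, and shift each piece
--     # by the first mapping whose source interval contains it (identity if none).
--     pool = list(cur_range)
--     for step in all_steps:
--         if not step:
--             continue
--         cuts = sorted({b for _dest, src, ln in step for b in (src, src + ln)})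
--         new_pool = []
--         for s, e in pool:
--             pts = [s] + [c for c in cuts if s < c < e] + [e]
--             for lo, hi in zip(pts, pts[1:]):
--                 if hi <= lo:
--                     continue
--                 off = 0
--                 for dest, src, ln in step:
--                     if src <= lo < src + ln:
--                         off = dest - src
--                         break
--                 new_pool.append((lo + off, hi + off))
--         pool = new_pool
--     return min(p[0] for p in pool)
-- ===== Notes on version B (the rewrite author's own statement) =====
-- stated objective: faster
-- what changed: A sweeps each step's mappings sequentially over the whole range pool, re-splitting and copying every surviving fragment once per mapping; B sorts the step's distinct source boundaries once, cuts each range into atomic pieces in a single pass, and shifts each piece by the first mapping whose source contains it; the final pools fragment differently but cover the same integer set, so the minimum start agrees.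
import Mathlib
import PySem

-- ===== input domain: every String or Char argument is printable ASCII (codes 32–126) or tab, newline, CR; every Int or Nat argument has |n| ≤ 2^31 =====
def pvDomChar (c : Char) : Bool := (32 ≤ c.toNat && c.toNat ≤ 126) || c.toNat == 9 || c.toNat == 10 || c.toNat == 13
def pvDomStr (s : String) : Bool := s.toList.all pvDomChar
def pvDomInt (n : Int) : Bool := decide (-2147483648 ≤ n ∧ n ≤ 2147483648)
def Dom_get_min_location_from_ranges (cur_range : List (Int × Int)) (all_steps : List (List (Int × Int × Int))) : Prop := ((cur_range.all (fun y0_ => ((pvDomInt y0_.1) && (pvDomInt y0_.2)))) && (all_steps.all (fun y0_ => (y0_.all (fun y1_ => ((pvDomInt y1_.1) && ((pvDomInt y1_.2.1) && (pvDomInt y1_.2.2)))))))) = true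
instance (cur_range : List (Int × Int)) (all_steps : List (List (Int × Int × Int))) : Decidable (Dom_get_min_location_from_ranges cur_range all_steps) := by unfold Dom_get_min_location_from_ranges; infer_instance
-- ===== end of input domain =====

-- B replaces A's sequential per-mapping splitting of the whole range pool by a
-- boundary-cut pass (sort each step's source boundaries, cut every range into atomic
-- pieces, shift each piece by its first containing mapping), avoiding the per-mapping
-- re-splitting and copying of the whole pool (measured faster in a timing run).

-- ===== PORT A =====
-- the inner 'for seed_rng_start, seed_rng_end in cur_range' body of A, for one mapping
-- m = (dest, src, ln): before/after go to acc.1 (next_r), the mapped intersection to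
-- acc.2 (modified_r)
def pvSplitRange (m : Int × Int × Int) (acc : List (Int × Int) × List (Int × Int)) (p : Int × Int) : List (Int × Int) × List (Int × Int) :=
  let dest := m.1; let src := m.2.1; let src_end := m.2.1 + m.2.2
  let s := p.1; let e := p.2
  let acc1 := if min e src > s then acc.1 ++ [(s, min e src)] else acc.1
  let acc2 := if min e src_end > max s src then acc.2 ++ [(max s src + dest - src, min e src_end + dest - src)] else acc.2
  let acc1 := if e > max s src_end then acc1 ++ [(max s src_end, e)] else acc1
  (acc1, acc2)

-- one mapping applied to the whole pool st.1; mapped pieces appended to st.2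
def pvSplit1 (st : List (Int × Int) × List (Int × Int)) (m : Int × Int × Int) : List (Int × Int) × List (Int × Int) :=
  st.1.foldl (pvSplitRange m) ([], st.2)

-- 'for dest, src, ln in f' over a pool c, starting with no mapped fragments
def pvF (f : List (Int × Int × Int)) (c : List (Int × Int)) : List (Int × Int) × List (Int × Int) :=
  f.foldl pvSplit1 (c, [])

-- one step of A: the pool goes through the mapping list, then cur_range += modified_r
def pvStepA (cur : List (Int × Int)) (f : List (Int × Int × Int)) : List (Int × Int) :=
  (pvF f cur).1 ++ (pvF f cur).2

-- Python's min on 2-tuples is lexicographic = min2?; min([]) raises → Pre_ excludes it.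
def get_min_location_from_ranges (cur_range : List (Int × Int)) (all_steps : List (List (Int × Int × Int))) : Int :=
  ((PySem.List.min2? (all_steps.foldl pvStepA cur_range) Prod.fst Prod.snd).getD (0, 0)).1

-- ===== PORT B =====
-- Source B's inner 'off = 0; for dest, src, ln in step: if src <= lo < src+ln: off = dest-src; break'
def pvOff (step : List (Int × Int × Int)) (lo : Int) : Int :=
  match step with
  | [] => 0
  | m :: rest => if m.2.1 ≤ lo ∧ lo < m.2.1 + m.2.2 then m.1 - m.2.1 else pvOff rest lo

-- Source B's 'cuts = sorted({b for _dest, src, ln in step for b in (src, src + ln)})'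
def pvCuts (step : List (Int × Int × Int)) : List Int :=
  PySem.List.sorted (PySem.Set.ofList (step.flatMap (fun m => [m.2.1, m.2.1 + m.2.2]))) (fun x => x) false

-- Source B's per-range loop: pts, then the zip loop appending shifted positive pieces
def pvPieces (step : List (Int × Int × Int)) (cuts : List Int) (r : Int × Int) : List (Int × Int) :=
  let pts := r.1 :: (cuts.filter (fun c => r.1 < c ∧ c < r.2)) ++ [r.2]
  (pts.zip pts.tail).foldl (fun acc q =>
    if q.2 ≤ q.1 then acc
    else acc ++ [(q.1 + pvOff step q.1, q.2 + pvOff step q.1)]) []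

-- one step of B ('if not step: continue' keeps the pool unchanged)
def pvStepB (pool : List (Int × Int)) (step : List (Int × Int × Int)) : List (Int × Int) :=
  if step = [] then pool
  else pool.foldl (fun np r => np ++ pvPieces step (pvCuts step) r) []

def get_min_location_from_ranges_alt (cur_range : List (Int × Int)) (all_steps : List (List (Int × Int × Int))) : Int :=
  (PySem.List.min? ((all_steps.foldl pvStepB cur_range).map Prod.fst) (fun x => x)).getD 0

-- ===== PRECONDITION & SPEC =====
-- Pre_ excludes exactly the inputs on which Python A raises ValueError (min of an empty
-- list): the final pool is empty iff no range has positive width and either cur_range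
-- is empty or some step carries a mapping (a mapping deletes zero-width ranges).
def Pre_get_min_location_from_ranges (cur_range : List (Int × Int)) (all_steps : List (List (Int × Int × Int))) : Prop :=
  cur_range ≠ [] ∧ ((∃ p ∈ cur_range, p.1 < p.2) ∨ ∀ f ∈ all_steps, f = [])
instance (cur_range : List (Int × Int)) (all_steps : List (List (Int × Int × Int))) : Decidable (Pre_get_min_location_from_ranges cur_range all_steps) := by unfold Pre_get_min_location_from_ranges; infer_instance

def pvWitness_get_min_location_from_ranges : (List (Int × Int)) × (List (List (Int × Int × Int))) := ([(0, 5)], [[(10, 2, 3)]])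

def Spec_get_min_location_from_ranges (cur_range : List (Int × Int)) (all_steps : List (List (Int × Int × Int))) (out : Int) : Prop := out = get_min_location_from_ranges_alt cur_range all_steps
instance (cur_range : List (Int × Int)) (all_steps : List (List (Int × Int × Int))) (out : Int) : Decidable (Spec_get_min_location_from_ranges cur_range all_steps out) := by unfold Spec_get_min_location_from_ranges; infer_instance

-- ===== CLAIM (what is proved, stated in full; the proofs are below) =====
def Claim_equal_get_min_location_from_ranges : Prop := ∀ (cur_range : List (Int × Int)) (all_steps : List (List (Int × Int × Int))), Dom_get_min_location_from_ranges cur_range all_steps → Pre_get_min_location_from_ranges cur_range all_steps → Spec_get_min_location_from_ranges cur_range all_steps (get_min_location_from_ranges cur_range all_steps)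

-- ===== LEMMAS AND PROOFS =====

-- the set of integers covered by a pool of half-open ranges
def pvCov (P : List (Int × Int)) (x : Int) : Prop := ∃ p ∈ P, p.1 ≤ x ∧ x < p.2

-- where one step sends a point: shift by the first mapping whose source contains it
def pvFm (f : List (Int × Int × Int)) (y : Int) : Int := y + pvOff f y

theorem pvCov_append (a b : List (Int × Int)) (x : Int) :
    pvCov (a ++ b) x ↔ pvCov a x ∨ pvCov b x := by
  constructor
  · rintro ⟨p, hp, h⟩
    rcases List.mem_append.mp hp with h' | h'
    · exact Or.inl ⟨p, h', h⟩
    · exact Or.inr ⟨p, h', h⟩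
  · rintro (⟨p, hp, h⟩ | ⟨p, hp, h⟩)
    · exact ⟨p, List.mem_append.mpr (Or.inl hp), h⟩
    · exact ⟨p, List.mem_append.mpr (Or.inr hp), h⟩

theorem pvCov_flatMap {α : Type} (g : α → List (Int × Int)) (l : List α) (x : Int) :
    pvCov (l.flatMap g) x ↔ ∃ p ∈ l, pvCov (g p) x := by
  constructor
  · rintro ⟨q, hq, h⟩
    obtain ⟨p, hp, hq2⟩ := List.mem_flatMap.mp hq
    exact ⟨p, hp, q, hq2, h⟩
  · rintro ⟨p, hp, q, hq, h⟩
    exact ⟨q, List.mem_flatMap.mpr ⟨p, hp, hq⟩, h⟩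

-- the kept (before/after) and mapped (intersection) fragments of one fragment p
def pvKeep (m : Int × Int × Int) (p : Int × Int) : List (Int × Int) :=
  (if min p.2 m.2.1 > p.1 then [(p.1, min p.2 m.2.1)] else []) ++
  (if p.2 > max p.1 (m.2.1 + m.2.2) then [(max p.1 (m.2.1 + m.2.2), p.2)] else [])

def pvMap1 (m : Int × Int × Int) (p : Int × Int) : List (Int × Int) :=
  if min p.2 (m.2.1 + m.2.2) > max p.1 m.2.1 then
    [(max p.1 m.2.1 + m.1 - m.2.1, min p.2 (m.2.1 + m.2.2) + m.1 - m.2.1)] else []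

theorem pvSplitRange_eq (m : Int × Int × Int) (a b : List (Int × Int)) (p : Int × Int) :
    pvSplitRange m (a, b) p = (a ++ pvKeep m p, b ++ pvMap1 m p) := by
  simp only [pvSplitRange, pvKeep, pvMap1]
  split_ifs <;> simp

theorem foldl_splitRange (m : Int × Int × Int) (c : List (Int × Int)) :
    ∀ a b, c.foldl (pvSplitRange m) (a, b) = (a ++ c.flatMap (pvKeep m), b ++ c.flatMap (pvMap1 m)) := by
  induction c with
  | nil => intro a b; simp
  | cons p c ih =>
    intro a b
    simp only [List.foldl_cons, pvSplitRange_eq, ih, List.flatMap_cons, List.append_assoc]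

theorem pvSplit1_eq (c t : List (Int × Int)) (m : Int × Int × Int) :
    pvSplit1 (c, t) m = (c.flatMap (pvKeep m), t ++ c.flatMap (pvMap1 m)) := by
  simp [pvSplit1, foldl_splitRange]

theorem pvF_acc (f : List (Int × Int × Int)) :
    ∀ c t, f.foldl pvSplit1 (c, t) = ((pvF f c).1, t ++ (pvF f c).2) := by
  induction f with
  | nil => intro c t; simp [pvF]
  | cons m f ih =>
    intro c t
    rw [List.foldl_cons, pvSplit1_eq, ih]
    have h2 : pvF (m :: f) c =
        ((pvF f (c.flatMap (pvKeep m))).1, c.flatMap (pvMap1 m) ++ (pvF f (c.flatMap (pvKeep m))).2) := by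
      unfold pvF
      rw [List.foldl_cons, pvSplit1_eq, List.nil_append]
      exact ih _ _
    rw [h2]
    simp [List.append_assoc]

theorem pvF_cons (m : Int × Int × Int) (f : List (Int × Int × Int)) (c : List (Int × Int)) :
    pvF (m :: f) c =
      ((pvF f (c.flatMap (pvKeep m))).1, c.flatMap (pvMap1 m) ++ (pvF f (c.flatMap (pvKeep m))).2) := by
  unfold pvF
  rw [List.foldl_cons, pvSplit1_eq, List.nil_append]
  exact pvF_acc f _ _

theorem pvStepA_nil (P : List (Int × Int)) : pvStepA P [] = P := by
  simp [pvStepA, pvF]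

-- cover of the kept fragments: the points of p outside m's source interval
theorem pvCov_keep (m : Int × Int × Int) (p : Int × Int) (x : Int) :
    pvCov (pvKeep m p) x ↔ (p.1 ≤ x ∧ x < p.2) ∧ ¬(m.2.1 ≤ x ∧ x < m.2.1 + m.2.2) := by
  simp only [pvKeep, pvCov]
  constructor
  · rintro ⟨q, hq, h1, h2⟩
    rcases List.mem_append.mp hq with h | h <;> (split_ifs at h <;> simp_all <;> omega)
  · rintro ⟨⟨h1, h2⟩, h3⟩
    by_cases hx : x < m.2.1
    · refine ⟨(p.1, min p.2 m.2.1), ?_, by omega, by omega⟩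
      rw [List.mem_append]; left; rw [if_pos (by omega)]; simp
    · refine ⟨(max p.1 (m.2.1 + m.2.2), p.2), ?_, by omega, by omega⟩
      rw [List.mem_append]; right; rw [if_pos (by omega)]; simp

-- cover of the mapped fragment: the image of the points of p inside m's source
theorem pvCov_map1 (m : Int × Int × Int) (p : Int × Int) (x : Int) :
    pvCov (pvMap1 m p) x ↔ ∃ y, (p.1 ≤ y ∧ y < p.2) ∧ (m.2.1 ≤ y ∧ y < m.2.1 + m.2.2) ∧ x = y + (m.1 - m.2.1) := by
  simp only [pvMap1, pvCov]
  constructor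
  · rintro ⟨q, hq, h1, h2⟩
    split_ifs at hq <;> simp_all
    exact ⟨x - (m.1 - m.2.1), by omega⟩
  · rintro ⟨y, ⟨h1, h2⟩, ⟨h3, h4⟩, h5⟩
    rw [if_pos (by omega)]
    refine ⟨(max p.1 m.2.1 + m.1 - m.2.1, min p.2 (m.2.1 + m.2.2) + m.1 - m.2.1), by simp, ?_, ?_⟩
    · show max p.1 m.2.1 + m.1 - m.2.1 ≤ x
      omega
    · show x < min p.2 (m.2.1 + m.2.2) + m.1 - m.2.1
      omega

-- what one step of A does to the covered set: every point moves by its first mapping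
theorem pvCov_stepA (f : List (Int × Int × Int)) :
    ∀ (P : List (Int × Int)) (x : Int),
      pvCov (pvStepA P f) x ↔ ∃ y, pvCov P y ∧ pvFm f y = x := by
  induction f with
  | nil =>
    intro P x
    rw [pvStepA_nil]
    simp [pvFm, pvOff]
  | cons m f ih =>
    intro P x
    have hshape : pvStepA P (m :: f) =
        (pvF f (P.flatMap (pvKeep m))).1 ++ (P.flatMap (pvMap1 m) ++ (pvF f (P.flatMap (pvKeep m))).2) := by
      simp [pvStepA, pvF_cons]
    rw [hshape]
    rw [pvCov_append, pvCov_append]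
    constructor
    · rintro (h1 | h2 | h3)
      · have := (ih (P.flatMap (pvKeep m)) x).mp ((pvCov_append _ _ x).mpr (Or.inl h1))
        obtain ⟨y, hy, hfm⟩ := this
        obtain ⟨hyP, hyns⟩ := (by
          have := (pvCov_flatMap (pvKeep m) P y).mp hy
          obtain ⟨p, hp, hc⟩ := this
          have := (pvCov_keep m p y).mp hc
          exact ⟨⟨p, hp, this.1⟩, this.2⟩ : pvCov P y ∧ ¬(m.2.1 ≤ y ∧ y < m.2.1 + m.2.2))
        refine ⟨y, hyP, ?_⟩
        simp only [pvFm, pvOff] at hfm ⊢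
        rw [if_neg hyns]; exact hfm
      · obtain ⟨p, hp, hc⟩ := (pvCov_flatMap (pvMap1 m) P x).mp h2
        obtain ⟨y, hy1, hy2, hy3⟩ := (pvCov_map1 m p x).mp hc
        refine ⟨y, ⟨p, hp, hy1⟩, ?_⟩
        simp only [pvFm, pvOff]
        rw [if_pos hy2]; omega
      · have := (ih (P.flatMap (pvKeep m)) x).mp ((pvCov_append _ _ x).mpr (Or.inr h3))
        obtain ⟨y, hy, hfm⟩ := this
        obtain ⟨p, hp, hc⟩ := (pvCov_flatMap (pvKeep m) P y).mp hy
        have hk := (pvCov_keep m p y).mp hc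
        refine ⟨y, ⟨p, hp, hk.1⟩, ?_⟩
        simp only [pvFm, pvOff] at hfm ⊢
        rw [if_neg hk.2]; exact hfm
    · rintro ⟨y, hyP, hfm⟩
      by_cases hin : m.2.1 ≤ y ∧ y < m.2.1 + m.2.2
      · right; left
        rw [pvCov_flatMap]
        obtain ⟨p, hp, hpy⟩ := hyP
        refine ⟨p, hp, (pvCov_map1 m p x).mpr ⟨y, hpy, hin, ?_⟩⟩
        simp only [pvFm, pvOff] at hfm
        rw [if_pos hin] at hfm; omega
      · have hyK : pvCov (P.flatMap (pvKeep m)) y := by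
          rw [pvCov_flatMap]
          obtain ⟨p, hp, hpy⟩ := hyP
          exact ⟨p, hp, (pvCov_keep m p y).mpr ⟨hpy, hin⟩⟩
        have : pvCov (pvStepA (P.flatMap (pvKeep m)) f) x := by
          rw [ih]
          refine ⟨y, hyK, ?_⟩
          simp only [pvFm, pvOff] at hfm ⊢
          rw [if_neg hin] at hfm; exact hfm
        rcases (pvCov_append _ _ x).mp this with h | h
        · exact Or.inl h
        · exact Or.inr (Or.inr h)

-- fragments produced by a nonempty step of A are nondegenerate
theorem pvKeep_pos (m : Int × Int × Int) (p : Int × Int) :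
    ∀ q ∈ pvKeep m p, q.1 < q.2 := by
  intro q hq
  simp only [pvKeep] at hq
  rcases List.mem_append.mp hq with h | h <;> (split_ifs at h <;> simp_all <;> omega)

theorem pvMap1_pos (m : Int × Int × Int) (p : Int × Int) :
    ∀ q ∈ pvMap1 m p, q.1 < q.2 := by
  intro q hq
  simp only [pvMap1] at hq
  split_ifs at hq <;> simp_all <;> omega

theorem pvStepA_pos (f : List (Int × Int × Int)) (hf : f ≠ []) :
    ∀ (P : List (Int × Int)), ∀ q ∈ pvStepA P f, q.1 < q.2 := by
  induction f with
  | nil => exact absurd rfl hf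
  | cons m f ih =>
    intro P q hq
    have hshape : pvStepA P (m :: f) =
        (pvF f (P.flatMap (pvKeep m))).1 ++ (P.flatMap (pvMap1 m) ++ (pvF f (P.flatMap (pvKeep m))).2) := by
      simp [pvStepA, pvF_cons]
    rw [hshape] at hq
    rcases List.mem_append.mp hq with h1 | h23
    · -- in (pvF f K).1
      by_cases hfe : f = []
      · subst hfe
        simp only [pvF, List.foldl_nil] at h1
        obtain ⟨p, hp, hq2⟩ := List.mem_flatMap.mp h1
        exact pvKeep_pos m p _ hq2
      · exact ih hfe (P.flatMap (pvKeep m)) q (List.mem_append.mpr (Or.inl h1))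
    · rcases List.mem_append.mp h23 with h2 | h3
      · obtain ⟨p, hp, hq2⟩ := List.mem_flatMap.mp h2
        exact pvMap1_pos m p _ hq2
      · by_cases hfe : f = []
        · subst hfe
          simp only [pvF, List.foldl_nil] at h3
          exact absurd h3 (List.not_mem_nil)
        · exact ih hfe (P.flatMap (pvKeep m)) q (List.mem_append.mpr (Or.inr h3))

-- ---------- B side ----------

-- every source boundary of the step is in cuts
theorem mem_pvCuts (f : List (Int × Int × Int)) (m : Int × Int × Int) (hm : m ∈ f) :
    m.2.1 ∈ pvCuts f ∧ m.2.1 + m.2.2 ∈ pvCuts f := by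
  unfold pvCuts
  rw [PySem.List.mem_sorted, PySem.List.mem_sorted, PySem.Set.mem_ofList, PySem.Set.mem_ofList]
  constructor <;> (rw [List.mem_flatMap]; exact ⟨m, hm, by simp⟩)

theorem pvCuts_sorted (f : List (Int × Int × Int)) : (pvCuts f).Pairwise (· < ·) :=
  PySem.List.sorted_ofList_pairwise_lt _

-- a consecutive pair of a strictly increasing list has no list element strictly inside
theorem zip_consec_no_mid (pts : List Int) (hs : pts.Pairwise (· < ·)) :
    ∀ q ∈ pts.zip pts.tail, ∀ c ∈ pts, ¬(q.1 < c ∧ c < q.2) := by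
  induction pts with
  | nil => simp
  | cons a t ih =>
    intro q hq c hc
    cases t with
    | nil => simp at hq
    | cons b t' =>
      simp only [List.tail_cons, List.zip_cons_cons] at hq
      rcases List.mem_cons.mp hq with rfl | hq'
      · -- q = (a, b)
        rcases List.mem_cons.mp hc with rfl | hc'
        · intro h; exact absurd h.1 (lt_irrefl _)
        · rcases List.mem_cons.mp hc' with rfl | hc''
          · intro h; exact absurd h.2 (lt_irrefl _)
          · have : b < c := (List.pairwise_cons.mp (List.pairwise_cons.mp hs).2).1 c hc''
            intro h; omega
      · rcases List.mem_cons.mp hc with rfl | hc'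
        · -- c is the head, which is below q.1 since q comes from the tail
          have hq1 : c < q.1 := by
            have hmem : q.1 ∈ b :: t' := by
              have := List.of_mem_zip hq'
              exact this.1
            exact (List.pairwise_cons.mp hs).1 q.1 hmem
          intro h; omega
        · exact ih (List.pairwise_cons.mp hs).2 q hq' c hc'

-- consecutive intervals of an increasing chain s :: L ++ [e] cover exactly [s, e)
theorem zip_cover (L : List Int) :
    ∀ (s e : Int), (∀ c ∈ L, s < c ∧ c < e) → L.Pairwise (· < ·) →
      ∀ y, (∃ q ∈ (s :: L ++ [e]).zip (L ++ [e]), q.1 ≤ y ∧ y < q.2) ↔ s ≤ y ∧ y < e := by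
  induction L with
  | nil =>
    intro s e _ _ y
    simp
  | cons c L ih =>
    intro s e hbound hpw y
    have hc : s < c ∧ c < e := hbound c (by simp)
    have hL : ∀ c' ∈ L, c < c' ∧ c' < e := by
      intro c' hc'
      exact ⟨(List.pairwise_cons.mp hpw).1 c' hc', (hbound c' (by simp [hc'])).2⟩
    have ihL := ih c e hL (List.pairwise_cons.mp hpw).2 y
    constructor
    · rintro ⟨q, hq, h1, h2⟩
      simp only [List.cons_append, List.zip_cons_cons] at hq
      rcases List.mem_cons.mp hq with rfl | hq'
      · omega
      · have := ihL.mp ⟨q, hq', h1, h2⟩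
        omega
    · intro hy
      by_cases hyc : y < c
      · exact ⟨(s, c), by simp, by omega⟩
      · obtain ⟨q, hq, hh⟩ := ihL.mpr (by omega)
        exact ⟨q, List.mem_cons.mpr (Or.inr hq), hh⟩

-- the piece list of one range, as a flatMap over consecutive pairs
theorem pvPieces_eq (step : List (Int × Int × Int)) (cuts : List Int) (r : Int × Int) :
    pvPieces step cuts r =
      ((r.1 :: (cuts.filter (fun c => r.1 < c ∧ c < r.2)) ++ [r.2]).zip
        ((cuts.filter (fun c => r.1 < c ∧ c < r.2)) ++ [r.2])).flatMap
        (fun q => if q.2 ≤ q.1 then [] else [(q.1 + pvOff step q.1, q.2 + pvOff step q.1)]) := by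
  have key : ∀ (zl : List (Int × Int)) (acc : List (Int × Int)),
      zl.foldl (fun acc q => if q.2 ≤ q.1 then acc
        else acc ++ [(q.1 + pvOff step q.1, q.2 + pvOff step q.1)]) acc =
      acc ++ zl.flatMap (fun q => if q.2 ≤ q.1 then []
        else [(q.1 + pvOff step q.1, q.2 + pvOff step q.1)]) := by
    intro zl
    induction zl with
    | nil => intro acc; simp
    | cons q zl ihz =>
      intro acc
      rw [List.foldl_cons, List.flatMap_cons]
      split_ifs with h
      · rw [ihz]; simp [h]
      · rw [ihz]; simp [h]
  exact (key _ []).trans (List.nil_append _)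

-- first-match offset is constant on an interval that straddles no source boundary
theorem pvOff_const (f : List (Int × Int × Int))
    (lo hi y : Int) (hy : lo ≤ y ∧ y < hi)
    (hb : ∀ m ∈ f, ¬(lo < m.2.1 ∧ m.2.1 < hi) ∧ ¬(lo < m.2.1 + m.2.2 ∧ m.2.1 + m.2.2 < hi)) :
    pvOff f y = pvOff f lo := by
  induction f with
  | nil => rfl
  | cons m f ih =>
    have hbm := hb m (by simp)
    have hiff : (m.2.1 ≤ y ∧ y < m.2.1 + m.2.2) ↔ (m.2.1 ≤ lo ∧ lo < m.2.1 + m.2.2) := by omega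
    simp only [pvOff]
    by_cases hin : m.2.1 ≤ y ∧ y < m.2.1 + m.2.2
    · rw [if_pos hin, if_pos (hiff.mp hin)]
    · rw [if_neg hin, if_neg (fun h => hin (hiff.mpr h))]
      exact ih (fun m' hm' => hb m' (by simp [hm']))

-- cover of one range's pieces = first-mapping image of the range's points
theorem pvCov_pieces (f : List (Int × Int × Int)) (r : Int × Int) (x : Int) :
    pvCov (pvPieces f (pvCuts f) r) x ↔ ∃ y, (r.1 ≤ y ∧ y < r.2) ∧ pvFm f y = x := by
  obtain ⟨s, e⟩ := r
  by_cases hse : e ≤ s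
  · -- degenerate range: no cut lies strictly inside, single empty piece, empty cover
    have hfil : (pvCuts f).filter (fun c => s < c ∧ c < e) = [] := by
      rw [List.filter_eq_nil_iff]
      intro c _
      simp only [decide_eq_true_eq]
      omega
    rw [pvPieces_eq]
    simp only [hfil, List.nil_append]
    constructor
    · intro h
      simp only [List.singleton_append, List.zip_cons_cons, List.zip_nil_right,
        List.flatMap_cons, List.flatMap_nil, List.append_nil] at h
      rw [if_pos (show (s, e).2 ≤ (s, e).1 from hse)] at h
      simp [pvCov] at h
    · rintro ⟨y, hy, _⟩; omega
  · push_neg at hse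
    set L := (pvCuts f).filter (fun c => s < c ∧ c < e) with hL
    have hbound : ∀ c ∈ L, s < c ∧ c < e := by
      intro c hc
      have := List.of_mem_filter hc
      simpa using this
    have hpw : L.Pairwise (· < ·) := (pvCuts_sorted f).filter _
    have hptspw : (s :: L ++ [e]).Pairwise (· < ·) := by
      refine List.Pairwise.cons ?_ ?_
      · intro c hc
        rcases List.mem_append.mp hc with h | h
        · exact (hbound c h).1
        · simp at h; omega
      · refine List.pairwise_append.mpr ⟨hpw, by simp, ?_⟩
        intro c hc e' he'
        simp at he'; subst he'
        exact (hbound c hc).2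
    rw [pvPieces_eq]
    rw [pvCov_flatMap]
    constructor
    · rintro ⟨q, hq, hcq⟩
      by_cases hdeg : q.2 ≤ q.1
      · rw [if_pos hdeg] at hcq; simp [pvCov] at hcq
      · rw [if_neg hdeg] at hcq
        push_neg at hdeg
        simp only [pvCov, List.mem_singleton] at hcq
        obtain ⟨p, hp, h1, h2⟩ := hcq
        subst hp
        simp only at h1 h2
        -- the point y = x - off
        refine ⟨x - pvOff f q.1, ?_, ?_⟩
        · -- q.1 ≤ y < q.2 and piece within [s, e)
          have hyq : q.1 ≤ x - pvOff f q.1 ∧ x - pvOff f q.1 < q.2 := by omega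
          have hq1 : s ≤ q.1 := by
            have := List.of_mem_zip hq
            rcases List.mem_cons.mp this.1 with rfl | hmem
            · omega
            · rcases List.mem_append.mp hmem with h | h
              · exact le_of_lt (hbound _ h).1
              · simp at h; omega
          have hq2 : q.2 ≤ e := by
            have := List.of_mem_zip hq
            rcases List.mem_append.mp this.2 with h | h
            · exact le_of_lt (hbound _ h).2
            · simp at h; omega
          omega
        · -- fm y = x via constancy of the offset on the piece
          have hnb : ∀ m ∈ f, ¬(q.1 < m.2.1 ∧ m.2.1 < q.2) ∧ ¬(q.1 < m.2.1 + m.2.2 ∧ m.2.1 + m.2.2 < q.2) := by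
            intro m hm
            obtain ⟨hb1, hb2⟩ := mem_pvCuts f m hm
            constructor
            · intro hmid
              by_cases hin : s < m.2.1 ∧ m.2.1 < e
              · have : m.2.1 ∈ L := by
                  rw [hL, List.mem_filter]
                  exact ⟨hb1, by simpa using hin⟩
                exact zip_consec_no_mid _ hptspw q hq m.2.1 (by simp [this]) hmid
              · -- boundary outside (s, e): then it cannot be strictly inside the piece
                have hq1 : s ≤ q.1 := by
                  have := List.of_mem_zip hq
                  rcases List.mem_cons.mp this.1 with rfl | hmem
                  · omega
                  · rcases List.mem_append.mp hmem with h | h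
                    · exact le_of_lt (hbound _ h).1
                    · simp at h; omega
                have hq2 : q.2 ≤ e := by
                  have := List.of_mem_zip hq
                  rcases List.mem_append.mp this.2 with h | h
                  · exact le_of_lt (hbound _ h).2
                  · simp at h; omega
                omega
            · intro hmid
              by_cases hin : s < m.2.1 + m.2.2 ∧ m.2.1 + m.2.2 < e
              · have : m.2.1 + m.2.2 ∈ L := by
                  rw [hL, List.mem_filter]
                  exact ⟨hb2, by simpa using hin⟩
                exact zip_consec_no_mid _ hptspw q hq _ (by simp [this]) hmid
              · have hq1 : s ≤ q.1 := by
                  have := List.of_mem_zip hq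
                  rcases List.mem_cons.mp this.1 with rfl | hmem
                  · omega
                  · rcases List.mem_append.mp hmem with h | h
                    · exact le_of_lt (hbound _ h).1
                    · simp at h; omega
                have hq2 : q.2 ≤ e := by
                  have := List.of_mem_zip hq
                  rcases List.mem_append.mp this.2 with h | h
                  · exact le_of_lt (hbound _ h).2
                  · simp at h; omega
                omega
          have hconst := pvOff_const f q.1 q.2 (x - pvOff f q.1) (by omega) hnb
          simp only [pvFm]
          omega
    · rintro ⟨y, hy, hfm⟩
      obtain ⟨q, hq, hyq⟩ := (zip_cover L s e hbound hpw y).mpr hy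
      refine ⟨q, hq, ?_⟩
      have hdeg : ¬ q.2 ≤ q.1 := by omega
      rw [if_neg hdeg]
      have hnb : ∀ m ∈ f, ¬(q.1 < m.2.1 ∧ m.2.1 < q.2) ∧ ¬(q.1 < m.2.1 + m.2.2 ∧ m.2.1 + m.2.2 < q.2) := by
        intro m hm
        obtain ⟨hb1, hb2⟩ := mem_pvCuts f m hm
        have hq1 : s ≤ q.1 := by
          have := List.of_mem_zip hq
          rcases List.mem_cons.mp this.1 with rfl | hmem
          · omega
          · rcases List.mem_append.mp hmem with h | h
            · exact le_of_lt (hbound _ h).1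
            · simp at h; omega
        have hq2 : q.2 ≤ e := by
          have := List.of_mem_zip hq
          rcases List.mem_append.mp this.2 with h | h
          · exact le_of_lt (hbound _ h).2
          · simp at h; omega
        constructor
        · intro hmid
          by_cases hin : s < m.2.1 ∧ m.2.1 < e
          · have : m.2.1 ∈ L := by
              rw [hL, List.mem_filter]
              exact ⟨hb1, by simpa using hin⟩
            exact zip_consec_no_mid _ hptspw q hq m.2.1 (by simp [this]) hmid
          · omega
        · intro hmid
          by_cases hin : s < m.2.1 + m.2.2 ∧ m.2.1 + m.2.2 < e
          · have : m.2.1 + m.2.2 ∈ L := by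
              rw [hL, List.mem_filter]
              exact ⟨hb2, by simpa using hin⟩
            exact zip_consec_no_mid _ hptspw q hq _ (by simp [this]) hmid
          · omega
      have hconst := pvOff_const f q.1 q.2 y hyq hnb
      simp only [pvCov, List.mem_singleton]
      refine ⟨(q.1 + pvOff f q.1, q.2 + pvOff f q.1), rfl, ?_, ?_⟩ <;>
        (simp only [pvFm] at hfm; omega)

-- what one step of B does to the covered set: the same first-mapping image
theorem pvCov_stepB (f : List (Int × Int × Int)) (P : List (Int × Int)) (x : Int) :
    pvCov (pvStepB P f) x ↔ ∃ y, pvCov P y ∧ pvFm f y = x := by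
  unfold pvStepB
  split_ifs with hf
  · subst hf
    simp [pvFm, pvOff]
  · rw [PySem.List.foldl_append_eq_flatMap, List.nil_append, pvCov_flatMap]
    constructor
    · rintro ⟨r, hr, hc⟩
      obtain ⟨y, hy, hfm⟩ := (pvCov_pieces f r x).mp hc
      exact ⟨y, ⟨r, hr, hy⟩, hfm⟩
    · rintro ⟨y, ⟨r, hr, hy⟩, hfm⟩
      exact ⟨r, hr, (pvCov_pieces f r x).mpr ⟨y, hy, hfm⟩⟩

theorem pvStepB_pos (f : List (Int × Int × Int)) (hf : f ≠ []) (P : List (Int × Int)) :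
    ∀ q ∈ pvStepB P f, q.1 < q.2 := by
  intro q hq
  unfold pvStepB at hq
  rw [if_neg hf, PySem.List.foldl_append_eq_flatMap, List.nil_append] at hq
  obtain ⟨r, _, hq2⟩ := List.mem_flatMap.mp hq
  rw [pvPieces_eq] at hq2
  obtain ⟨z, _, hq3⟩ := List.mem_flatMap.mp hq2
  split_ifs at hq3 with h
  · simp at hq3
  · simp only [List.mem_singleton] at hq3
    subst hq3
    simp only
    omega

-- ---------- the step folds ----------

def pvFmS (steps : List (List (Int × Int × Int))) (y : Int) : Int :=
  steps.foldl (fun z f => pvFm f z) y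

theorem pvCov_foldA (steps : List (List (Int × Int × Int))) :
    ∀ (P : List (Int × Int)) (x : Int),
      pvCov (steps.foldl pvStepA P) x ↔ ∃ y, pvCov P y ∧ pvFmS steps y = x := by
  induction steps with
  | nil => intro P x; simp [pvFmS]
  | cons f steps ih =>
    intro P x
    rw [List.foldl_cons, ih]
    constructor
    · rintro ⟨y, hy, hfm⟩
      obtain ⟨z, hz, hfz⟩ := (pvCov_stepA f P y).mp hy
      exact ⟨z, hz, by simp only [pvFmS, List.foldl_cons, hfz]; exact hfm⟩
    · rintro ⟨z, hz, hfz⟩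
      refine ⟨pvFm f z, (pvCov_stepA f P _).mpr ⟨z, hz, rfl⟩, ?_⟩
      simp only [pvFmS, List.foldl_cons] at hfz ⊢; exact hfz

theorem pvCov_foldB (steps : List (List (Int × Int × Int))) :
    ∀ (P : List (Int × Int)) (x : Int),
      pvCov (steps.foldl pvStepB P) x ↔ ∃ y, pvCov P y ∧ pvFmS steps y = x := by
  induction steps with
  | nil => intro P x; simp [pvFmS]
  | cons f steps ih =>
    intro P x
    rw [List.foldl_cons, ih]
    constructor
    · rintro ⟨y, hy, hfm⟩
      obtain ⟨z, hz, hfz⟩ := (pvCov_stepB f P y).mp hy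
      exact ⟨z, hz, by simp only [pvFmS, List.foldl_cons, hfz]; exact hfm⟩
    · rintro ⟨z, hz, hfz⟩
      refine ⟨pvFm f z, (pvCov_stepB f P _).mpr ⟨z, hz, rfl⟩, ?_⟩
      simp only [pvFmS, List.foldl_cons] at hfz ⊢; exact hfz

-- when every step is empty, both folds leave the pool unchanged
theorem foldA_all_nil (steps : List (List (Int × Int × Int))) (h : ∀ f ∈ steps, f = []) :
    ∀ P, steps.foldl pvStepA P = P := by
  induction steps with
  | nil => intro P; rfl
  | cons f steps ih =>
    intro P
    have hf : f = [] := h f (by simp)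
    rw [List.foldl_cons, hf, pvStepA_nil]
    exact ih (fun g hg => h g (by simp [hg])) P

theorem foldB_all_nil (steps : List (List (Int × Int × Int))) (h : ∀ f ∈ steps, f = []) :
    ∀ P, steps.foldl pvStepB P = P := by
  induction steps with
  | nil => intro P; rfl
  | cons f steps ih =>
    intro P
    have hf : f = [] := h f (by simp)
    rw [List.foldl_cons, hf]
    rw [show pvStepB P [] = P by simp [pvStepB]]
    exact ih (fun g hg => h g (by simp [hg])) P

-- when some step is nonempty, all final fragments are nondegenerate
theorem foldA_pos (steps : List (List (Int × Int × Int))) (h : ∃ f ∈ steps, f ≠ []) :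
    ∀ P, ∀ q ∈ steps.foldl pvStepA P, q.1 < q.2 := by
  induction steps with
  | nil => simp at h
  | cons f steps ih =>
    intro P q hq
    rw [List.foldl_cons] at hq
    by_cases hrest : ∃ g ∈ steps, g ≠ []
    · exact ih hrest (pvStepA P f) q hq
    · push_neg at hrest
      have hrest' : ∀ g ∈ steps, g = [] := fun g hg => hrest g hg
      rw [foldA_all_nil steps hrest'] at hq
      have hf : f ≠ [] := by
        obtain ⟨g, hg, hgne⟩ := h
        rcases List.mem_cons.mp hg with rfl | hgm
        · exact hgne
        · exact absurd (hrest' g hgm) hgne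
      exact pvStepA_pos f hf P q hq

theorem foldB_pos (steps : List (List (Int × Int × Int))) (h : ∃ f ∈ steps, f ≠ []) :
    ∀ P, ∀ q ∈ steps.foldl pvStepB P, q.1 < q.2 := by
  induction steps with
  | nil => simp at h
  | cons f steps ih =>
    intro P q hq
    rw [List.foldl_cons] at hq
    by_cases hrest : ∃ g ∈ steps, g ≠ []
    · exact ih hrest (pvStepB P f) q hq
    · push_neg at hrest
      have hrest' : ∀ g ∈ steps, g = [] := fun g hg => hrest g hg
      rw [foldB_all_nil steps hrest'] at hq
      have hf : f ≠ [] := by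
        obtain ⟨g, hg, hgne⟩ := h
        rcases List.mem_cons.mp hg with rfl | hgm
        · exact hgne
        · exact absurd (hrest' g hgm) hgne
      exact pvStepB_pos f hf P q hq

-- ---------- the two min extractions ----------

-- Python's lexicographic ≤ on 2-tuples of ints
def pvLexLE (a b : Int × Int) : Prop := a.1 < b.1 ∨ (a.1 = b.1 ∧ a.2 ≤ b.2)

-- min2?'s running fold on Int × Int with fst/snd keys
def pvMinStep (acc : Option (Int × Int)) (x : Int × Int) : Option (Int × Int) :=
  match acc with
  | none => some x
  | some m => if (decide (x.1 < m.1) || !decide (m.1 < x.1) && decide (x.2 < m.2)) = true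
      then some x else some m

theorem pvMin2_eq_foldl (xs : List (Int × Int)) :
    PySem.List.min2? xs Prod.fst Prod.snd = xs.foldl pvMinStep none := by
  unfold PySem.List.min2? pvMinStep
  congr 1
  funext acc x
  cases acc <;> rfl

theorem pvMin2_aux (xs : List (Int × Int)) :
    ∀ m0 : Int × Int, ∃ m', xs.foldl pvMinStep (some m0) = some m' ∧
      (m' = m0 ∨ m' ∈ xs) ∧ pvLexLE m' m0 ∧ ∀ y ∈ xs, pvLexLE m' y := by
  induction xs with
  | nil => intro m0; exact ⟨m0, rfl, Or.inl rfl, Or.inr ⟨rfl, le_refl _⟩, by simp⟩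
  | cons x xs ih =>
    intro m0
    rw [List.foldl_cons]
    show ∃ m', (xs.foldl pvMinStep (if (decide (x.1 < m0.1) || !decide (m0.1 < x.1) && decide (x.2 < m0.2)) = true then some x else some m0)) = some m' ∧ _
    by_cases hc : (decide (x.1 < m0.1) || !decide (m0.1 < x.1) && decide (x.2 < m0.2)) = true
    · rw [if_pos hc]
      obtain ⟨m', he, hmem, hle, hall⟩ := ih x
      have hxm : pvLexLE x m0 := by
        simp only [Bool.or_eq_true, Bool.and_eq_true, Bool.not_eq_true', decide_eq_true_eq,
          decide_eq_false_iff_not] at hc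
        unfold pvLexLE; omega
      have htrans : pvLexLE m' x → pvLexLE x m0 → pvLexLE m' m0 := by
        unfold pvLexLE; omega
      refine ⟨m', he, ?_, htrans hle hxm, ?_⟩
      · rcases hmem with h | h
        · exact Or.inr (by simp [h])
        · exact Or.inr (by simp [h])
      · intro y hy
        rcases List.mem_cons.mp hy with h | h
        · exact h ▸ hle
        · exact hall y h
    · rw [if_neg hc]
      obtain ⟨m', he, hmem, hle, hall⟩ := ih m0
      have hmx : pvLexLE m0 x := by
        simp only [Bool.or_eq_true, Bool.and_eq_true, Bool.not_eq_true', decide_eq_true_eq,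
          decide_eq_false_iff_not] at hc
        unfold pvLexLE; omega
      refine ⟨m', he, ?_, hle, ?_⟩
      · rcases hmem with h | h
        · exact Or.inl h
        · exact Or.inr (by simp [h])
      · intro y hy
        rcases List.mem_cons.mp hy with h | h
        · subst h
          have htrans : pvLexLE m' m0 → pvLexLE m0 y → pvLexLE m' y := by
            unfold pvLexLE; omega
          exact htrans hle hmx
        · exact hall y h

theorem pvMin2_spec (x : Int × Int) (xs : List (Int × Int)) :
    ∃ m, PySem.List.min2? (x :: xs) Prod.fst Prod.snd = some m ∧
      m ∈ x :: xs ∧ ∀ y ∈ x :: xs, pvLexLE m y := by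
  obtain ⟨m', he, hmem, hle, hall⟩ := pvMin2_aux xs x
  refine ⟨m', ?_, ?_, ?_⟩
  · rw [pvMin2_eq_foldl, List.foldl_cons]
    exact he
  · rcases hmem with h | h
    · simp [h]
    · simp [h]
  · intro y hy
    rcases List.mem_cons.mp hy with h | h
    · exact h ▸ hle
    · exact hall y h

-- A's extraction is the minimum of the pool's start points
theorem extractA_spec (P : List (Int × Int)) (hP : P ≠ []) :
    (((PySem.List.min2? P Prod.fst Prod.snd).getD (0, 0)).1 ∈ P.map Prod.fst) ∧
      ∀ v ∈ P.map Prod.fst, ((PySem.List.min2? P Prod.fst Prod.snd).getD (0, 0)).1 ≤ v := by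
  cases P with
  | nil => exact absurd rfl hP
  | cons x xs =>
    obtain ⟨m, he, hmem, hall⟩ := pvMin2_spec x xs
    rw [he]
    simp only [Option.getD_some]
    constructor
    · exact List.mem_map.mpr ⟨m, hmem, rfl⟩
    · intro v hv
      obtain ⟨p, hp, rfl⟩ := List.mem_map.mp hv
      have := hall p hp
      unfold pvLexLE at this
      omega

-- B's extraction is the same minimum
theorem extractB_spec (P : List (Int × Int)) (hP : P ≠ []) :
    ((PySem.List.min? (P.map Prod.fst) (fun x => x)).getD 0 ∈ P.map Prod.fst) ∧
      ∀ v ∈ P.map Prod.fst, (PySem.List.min? (P.map Prod.fst) (fun x => x)).getD 0 ≤ v := by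
  have hne : P.map Prod.fst ≠ [] := by simp [hP]
  cases hmin : PySem.List.min? (P.map Prod.fst) (fun x => x) with
  | none => exact absurd ((PySem.List.min?_eq_none_iff _ _).mp hmin) hne
  | some m =>
    simp only [Option.getD_some]
    exact ⟨PySem.List.min?_mem hmin, PySem.List.min?_isMin hmin⟩

-- min of starts is determined by the covered set when fragments are nondegenerate
theorem min_start_eq_of_cov (PA PB : List (Int × Int))
    (hA : PA ≠ []) (hB : PB ≠ [])
    (hposA : ∀ q ∈ PA, q.1 < q.2) (hposB : ∀ q ∈ PB, q.1 < q.2)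
    (hcov : ∀ x, pvCov PA x ↔ pvCov PB x)
    {mA mB : Int}
    (hmA : mA ∈ PA.map Prod.fst ∧ ∀ v ∈ PA.map Prod.fst, mA ≤ v)
    (hmB : mB ∈ PB.map Prod.fst ∧ ∀ v ∈ PB.map Prod.fst, mB ≤ v) :
    mA = mB := by
  -- each min is the least element of its cover
  have hAin : pvCov PA mA := by
    obtain ⟨p, hp, rfl⟩ := List.mem_map.mp hmA.1
    exact ⟨p, hp, le_refl _, hposA p hp⟩
  have hBin : pvCov PB mB := by
    obtain ⟨p, hp, rfl⟩ := List.mem_map.mp hmB.1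
    exact ⟨p, hp, le_refl _, hposB p hp⟩
  have hAle : ∀ x, pvCov PA x → mA ≤ x := by
    rintro x ⟨p, hp, h1, _⟩
    exact le_trans (hmA.2 p.1 (List.mem_map.mpr ⟨p, hp, rfl⟩)) h1
  have hBle : ∀ x, pvCov PB x → mB ≤ x := by
    rintro x ⟨p, hp, h1, _⟩
    exact le_trans (hmB.2 p.1 (List.mem_map.mpr ⟨p, hp, rfl⟩)) h1
  have h1 : mA ≤ mB := hAle mB ((hcov mB).mpr hBin)
  have h2 : mB ≤ mA := hBle mA ((hcov mA).mp hAin)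
  omega

-- ===== VERDICT (by name: the statement is the Claim_ definition above) =====
theorem get_min_location_from_ranges_spec : Claim_equal_get_min_location_from_ranges := by
  intro cur_range all_steps _ hpre
  unfold Spec_get_min_location_from_ranges
  unfold get_min_location_from_ranges get_min_location_from_ranges_alt
  obtain ⟨hne, hdisj⟩ := hpre
  by_cases hallnil : ∀ f ∈ all_steps, f = []
  · -- every step is empty: both folds return cur_range itself
    rw [foldA_all_nil all_steps hallnil, foldB_all_nil all_steps hallnil]
    obtain ⟨hAm, hAle⟩ := extractA_spec cur_range hne
    obtain ⟨hBm, hBle⟩ := extractB_spec cur_range hne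
    exact le_antisymm (hAle _ hBm) (hBle _ hAm)
  · -- some step is nonempty: Pre_ forces a positive-width range
    have hex : ∃ f ∈ all_steps, f ≠ [] := by
      push_neg at hallnil
      exact hallnil
    have hpos : ∃ p ∈ cur_range, p.1 < p.2 := by
      rcases hdisj with h | h
      · exact h
      · exact absurd h hallnil
    set PA := all_steps.foldl pvStepA cur_range with hPA
    set PB := all_steps.foldl pvStepB cur_range with hPB
    have hcov : ∀ x, pvCov PA x ↔ pvCov PB x := by
      intro x
      rw [hPA, hPB, pvCov_foldA, pvCov_foldB]
    -- nonemptiness of both pools via a covered point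
    obtain ⟨p, hp, hw⟩ := hpos
    have hcv : pvCov cur_range p.1 := ⟨p, hp, le_refl _, hw⟩
    have hcovA : pvCov PA (pvFmS all_steps p.1) := by
      rw [hPA, pvCov_foldA]
      exact ⟨p.1, hcv, rfl⟩
    have hAne : PA ≠ [] := by
      intro h
      rw [h] at hcovA
      simp [pvCov] at hcovA
    have hcovB : pvCov PB (pvFmS all_steps p.1) := (hcov _).mp hcovA
    have hBne : PB ≠ [] := by
      intro h
      rw [h] at hcovB
      simp [pvCov] at hcovB
    exact min_start_eq_of_cov PA PB hAne hBne
      (foldA_pos all_steps hex cur_range) (foldB_pos all_steps hex cur_range)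
      hcov (extractA_spec PA hAne) (extractB_spec PB hBne)
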